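-- pv_equiv track=rewrite | github.com/jcmullwh/usertest | apps/usertest_backlog/src/usertest_backlog/triage_backlog.py | _assign_global_ids
-- ===== SOURCE A (Python) =====
-- from collections.abc import Sequence
-- from typing import Any
--
-- def _coerce_string(value: Any) -> str:
--     if isinstance(value, str):
--         return value.strip()
--     if value is None:
--         return ""
--     return str(value).strip()
--
-- def _base_global_id(item: dict[str, Any], *, group: str | None, fallback_index: int) -> str:
--     ticket_id = _coerce_string(item.get("ticket_id")) or _coerce_string(item.get("id"))
--     if group and ticket_id:
--         return f"{group}/{ticket_id}"
--     return f"issue-{fallback_index + 1:04d}"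
--
-- def _assign_global_ids(items: Sequence[dict[str, Any]], groups: Sequence[str | None]) -> list[str]:
--     seen: dict[str, int] = {}
--     ids: list[str] = []
--     for idx, item in enumerate(items):
--         base = _base_global_id(item, group=groups[idx], fallback_index=idx)
--         count = seen.get(base, 0) + 1
--         seen[base] = count
--         ids.append(base if count == 1 else f"{base}#{count}")
--     return ids
-- ===== SOURCE B (Python) =====
-- from collections.abc import Sequence
-- from typing import Any
--
--
-- def _coerce_string(value: Any) -> str:
--     if isinstance(value, str):
--         return value.strip()
--     if value is None:
--         return ""
--     return str(value).strip()
--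
--
-- def _base_global_id(item: dict[str, Any], *, group: str | None, fallback_index: int) -> str:
--     ticket_id = _coerce_string(item.get("ticket_id")) or _coerce_string(item.get("id"))
--     if group and ticket_id:
--         return f"{group}/{ticket_id}"
--     return f"issue-{fallback_index + 1:04d}"
--
--
-- def _assign_global_ids(items: Sequence[dict[str, Any]], groups: Sequence[str | None]) -> list[str]:
--     # Group-and-scatter: compute all base ids, then handle each distinct base id
--     # as a whole group, numbering its occurrences and writing the results back
--     # into a preallocated output by position.
--     bases = [
--         _base_global_id(item, group=groups[idx], fallback_index=idx)
--         for idx, item in enumerate(items)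
--     ]
--     out = [""] * len(bases)
--     for base in dict.fromkeys(bases):
--         occurrences = [i for i, b in enumerate(bases) if b == base]
--         for k, i in enumerate(occurrences, start=1):
--             out[i] = base if k == 1 else f"{base}#{k}"
--     return out
-- ===== Notes on version B (the rewrite author's own statement) =====
-- stated objective: alternative
-- what changed: Replaces A's single sequential pass with a maintained running-count dict by a group-and-scatter strategy: materialise all base ids, then process each distinct base id as a whole group, enumerating its occurrence positions and writing the numbered ids into a preallocated output array out of input order.
import Mathlib
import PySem

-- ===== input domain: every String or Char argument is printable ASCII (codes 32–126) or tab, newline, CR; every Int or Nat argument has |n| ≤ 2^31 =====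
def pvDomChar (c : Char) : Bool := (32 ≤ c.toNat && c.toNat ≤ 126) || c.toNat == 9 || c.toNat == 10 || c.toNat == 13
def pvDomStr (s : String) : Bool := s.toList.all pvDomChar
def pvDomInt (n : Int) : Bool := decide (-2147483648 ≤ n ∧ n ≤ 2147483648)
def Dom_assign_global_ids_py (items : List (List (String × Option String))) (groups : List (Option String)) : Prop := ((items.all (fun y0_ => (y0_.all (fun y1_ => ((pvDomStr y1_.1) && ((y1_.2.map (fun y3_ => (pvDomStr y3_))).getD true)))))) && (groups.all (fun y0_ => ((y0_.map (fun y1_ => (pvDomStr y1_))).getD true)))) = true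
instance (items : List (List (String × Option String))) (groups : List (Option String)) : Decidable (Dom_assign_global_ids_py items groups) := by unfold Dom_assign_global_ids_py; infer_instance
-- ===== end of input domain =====

-- B replaces A's single dict-driven pass by a group-and-scatter pass over the distinct base ids (alternative decomposition, not faster).


-- ===== PORT A =====
-- shared module helper: _coerce_string (values here are Option String; None → "", str → strip)
def pvCoerceString (v : Option String) : String :=
  match v with
  | some s => PySem.Str.strip s
  | none => ""

-- item.get(k): association-list lookup (first match, per the dict convention); missing key → Python None → ""
def pvGetStr (item : List (String × Option String)) (k : String) : String :=
  match (PySem.Dict.mk item).get? k with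
  | none => ""
  | some v => pvCoerceString v

-- f"issue-{fallback_index + 1:04d}" (fallback_index + 1 ≥ 1 here, so no sign handling is needed)
def pvIssue (fallbackIndex : Int) : String :=
  let cs := PySem.Int.toChars (fallbackIndex + 1)
  "issue-" ++ String.ofList (List.replicate (4 - cs.length) '0' ++ cs)

-- shared module helper: _base_global_id
def pvBaseGlobalId (item : List (String × Option String)) (group : Option String) (fallbackIndex : Int) : String :=
  let t := pvGetStr item "ticket_id"
  let ticketId := if t ≠ "" then t else pvGetStr item "id"
  let groupTruthy : Bool := match group with | some g => g != "" | none => false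
  if groupTruthy = true ∧ ticketId ≠ "" then group.getD "" ++ "/" ++ ticketId
  else pvIssue fallbackIndex

-- A's loop: for idx, item in enumerate(items), maintaining the dict 'seen' and the list 'ids'.
-- groups[idx]: pyGet? is none exactly where Python raises IndexError; Pre_ excludes that, '.getD none' only fills the excluded case.
def pvLoopA (groups : List (Option String)) : List (Int × List (String × Option String)) → PySem.Dict String Int → List String → List String
  | [], _, ids => ids
  | (idx, item) :: rest, seen, ids =>
    let base := pvBaseGlobalId item ((PySem.List.pyGet? groups idx).getD none) idx
    let count := seen.getD base 0 + 1
    pvLoopA groups rest (seen.insert base count)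
      (ids ++ [if count = 1 then base else base ++ "#" ++ PySem.Int.toStr count])

def assign_global_ids_py (items : List (List (String × Option String))) (groups : List (Option String)) : List String :=
  pvLoopA groups (PySem.List.enumerate items) PySem.Dict.empty []

-- ===== PORT B =====
-- pass 1 of Source B: bases = [_base_global_id(item, group=groups[idx], fallback_index=idx) for idx, item in enumerate(items)]
def pvBases (items : List (List (String × Option String))) (groups : List (Option String)) : List String :=
  (PySem.List.enumerate items).map
    (fun p => pvBaseGlobalId p.2 ((PySem.List.pyGet? groups p.1).getD none) p.1)

-- occurrences = [i for i, b in enumerate(bases) if b == base]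
def pvOcc (bases : List String) (base : String) : List Int :=
  ((PySem.List.enumerate bases).filter (fun p => p.2 == base)).map (fun p => p.1)

-- for k, i in enumerate(occurrences, start=1): out[i] = base if k == 1 else f"{base}#{k}"
-- (out[i] = v on an always-in-range i: pySetD is exact there)
def pvScatter (out : List String) (base : String) (occ : List Int) : List String :=
  (PySem.List.enumerate occ 1).foldl
    (fun acc p => PySem.List.pySetD acc p.2 (if p.1 = 1 then base else base ++ "#" ++ PySem.Int.toStr p.1)) out

def assign_global_ids_py_alt (items : List (List (String × Option String))) (groups : List (Option String)) : List String :=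
  let bases := pvBases items groups
  (PySem.List.dedup bases).foldl (fun out base => pvScatter out base (pvOcc bases base))
    (List.replicate bases.length "")

-- ===== PRECONDITION & SPEC =====
-- Pre_ excludes exactly the inputs where groups[idx] raises IndexError in both Pythons.
def Pre_assign_global_ids_py (items : List (List (String × Option String))) (groups : List (Option String)) : Prop :=
  items.length ≤ groups.length
instance (items : List (List (String × Option String))) (groups : List (Option String)) : Decidable (Pre_assign_global_ids_py items groups) := by unfold Pre_assign_global_ids_py; infer_instance

def pvWitness_assign_global_ids_py : (List (List (String × Option String))) × List (Option String) :=
  ([[("ticket_id", some "T1")], [("ticket_id", some "T1")]], [some "g", some "g"])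

def Spec_assign_global_ids_py (items : List (List (String × Option String))) (groups : List (Option String)) (out : List String) : Prop := out = assign_global_ids_py_alt items groups
instance (items : List (List (String × Option String))) (groups : List (Option String)) (out : List String) : Decidable (Spec_assign_global_ids_py items groups out) := by unfold Spec_assign_global_ids_py; infer_instance

-- ===== CLAIM (what is proved, stated in full; the proofs are below) =====
def Claim_equal_assign_global_ids_py : Prop := ∀ (items : List (List (String × Option String))) (groups : List (Option String)), Dom_assign_global_ids_py items groups → Pre_assign_global_ids_py items groups → Spec_assign_global_ids_py items groups (assign_global_ids_py items groups)

-- ===== LEMMAS AND PROOFS =====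

-- the rendered id of the j-th item: its base, suffixed with its 1-based running count
def pvRender (b : String) (c : Int) : String :=
  if c = 1 then b else b ++ "#" ++ PySem.Int.toStr c

def pvSpecF (bases : List String) (j : Nat) : String :=
  pvRender (bases.getD j "") (((bases.take j).count (bases.getD j "") : Int) + 1)

-- A's loop re-expressed on the base list with an explicit prefix accumulator
def pvPrefix : List String → List String → List String
  | _, [] => []
  | pre, b :: bs =>
    let c : Int := (pre.count b : Int) + 1
    (if c = 1 then b else b ++ "#" ++ PySem.Int.toStr c) :: pvPrefix (pre ++ [b]) bs

-- Invariant: 'seen' holds exactly the multiplicities of the already-emitted prefix 'pre'.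
theorem pvLoopA_eq_prefix (groups : List (Option String)) :
    ∀ (pairs : List (Int × List (String × Option String))) (seen : PySem.Dict String Int)
      (ids : List String) (pre : List String),
      (∀ b, seen.getD b 0 = (pre.count b : Int)) →
      pvLoopA groups pairs seen ids =
        ids ++ pvPrefix pre (pairs.map (fun p => pvBaseGlobalId p.2 ((PySem.List.pyGet? groups p.1).getD none) p.1)) := by
  intro pairs
  induction pairs with
  | nil => intro seen ids pre _; simp [pvLoopA, pvPrefix]
  | cons p rest ih =>
    intro seen ids pre hinv
    obtain ⟨idx, item⟩ := p
    simp only [pvLoopA, pvPrefix, List.map_cons]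
    rw [hinv]
    rw [ih _ _ (pre ++ [pvBaseGlobalId item ((PySem.List.pyGet? groups idx).getD none) idx]) ?_]
    · simp
    · intro b
      rw [PySem.Dict.getD_insert]
      rcases eq_or_ne b (pvBaseGlobalId item ((PySem.List.pyGet? groups idx).getD none) idx) with h | h
      · simp [h, List.count_append]
      · simp [h, hinv, List.count_append, Ne.symm h]

theorem length_pvPrefix : ∀ (bs pre : List String), (pvPrefix pre bs).length = bs.length := by
  intro bs
  induction bs with
  | nil => intro pre; simp [pvPrefix]
  | cons b bs ih => intro pre; simp [pvPrefix, ih]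

theorem getElem?_pvPrefix : ∀ (bs pre : List String) (j : Nat), j < bs.length →
    (pvPrefix pre bs)[j]? =
      some (pvRender (bs.getD j "") (((pre ++ bs.take j).count (bs.getD j "") : Int) + 1)) := by
  intro bs
  induction bs with
  | nil => intro pre j h; simp at h
  | cons b bs ih =>
    intro pre j h
    cases j with
    | zero => simp [pvPrefix, pvRender]
    | succ j =>
      simp only [pvPrefix, List.getElem?_cons_succ]
      rw [ih (pre ++ [b]) j (by simpa using h)]
      simp [List.count_append, List.count_cons]

-- ===== B side =====
theorem pvOcc_append (xs : List String) (x b : String) :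
    pvOcc (xs ++ [x]) b = pvOcc xs b ++ (if x == b then [(xs.length : Int)] else []) := by
  simp only [pvOcc, PySem.List.enumerate_append, List.filter_append, List.map_append]
  congr 1
  simp [PySem.List.enumerate_cons, PySem.List.enumerate_nil]
  split <;> simp_all

theorem pvOcc_length (xs : List String) (b : String) : (pvOcc xs b).length = xs.count b := by
  simp only [pvOcc, List.length_map]
  rw [← List.countP_eq_length_filter,
    show (fun (p : Int × String) => p.2 == b) = ((fun s => s == b) ∘ (fun p : Int × String => p.2)) from rfl,
    ← List.countP_map, PySem.List.map_snd_enumerate]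
  rfl

theorem pvOcc_spec : ∀ (xs : List String) (b : String) (k : Nat) (i : Int),
    (pvOcc xs b)[k]? = some i →
    ∃ j : Nat, i = (j : Int) ∧ j < xs.length ∧ xs[j]? = some b ∧ (xs.take j).count b = k := by
  intro xs
  induction xs using List.reverseRecOn with
  | nil => intro b k i h; simp [pvOcc, PySem.List.enumerate_nil] at h
  | append_singleton xs x ih =>
    intro b k i h
    rw [pvOcc_append] at h
    by_cases hk : k < (pvOcc xs b).length
    · rw [List.getElem?_append_left hk] at h
      obtain ⟨j, hij, hjlt, hjb, hcnt⟩ := ih b k i h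
      refine ⟨j, hij, by simp; omega, ?_, ?_⟩
      · rw [List.getElem?_append_left hjlt]; exact hjb
      · rw [List.take_append_of_le_length (le_of_lt hjlt)]; exact hcnt
    · rw [List.getElem?_append_right (le_of_not_gt hk)] at h
      by_cases hx : (x == b)
      · simp only [hx, if_pos] at h
        have hxb : x = b := by exact eq_of_beq hx
        have hk0 : k - (pvOcc xs b).length = 0 := by
          by_contra hne
          rw [List.getElem?_eq_none (by simp; omega)] at h
          simp at h
        simp [hk0] at h
        have hkeq : k = (pvOcc xs b).length := by omega
        refine ⟨xs.length, h.symm, by simp, ?_, ?_⟩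
        · simp [hxb]
        · rw [List.take_append_of_le_length (le_refl _)]
          simp [hkeq, pvOcc_length]
      · rw [if_neg hx] at h
        simp at h

theorem pvOcc_mem (xs : List String) (b : String) (j : Nat) (hj : j < xs.length)
    (hb : xs[j]? = some b) : (j : Int) ∈ pvOcc xs b := by
  simp only [pvOcc, List.mem_map, List.mem_filter]
  refine ⟨((j : Int), b), ⟨?_, by simp⟩, rfl⟩
  rw [PySem.List.mem_enumerate_iff]
  refine ⟨j, hj, ?_⟩
  simp
  exact (List.getElem_eq_iff hj).mpr hb |>.symm

-- a fold of in-range writes each of which writes the specified value for its position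
theorem scatter_fold (b : String) (specv : Nat → String) :
    ∀ (ws : List (Int × Int)) (acc : List String),
      (∀ p ∈ ws, ∃ j : Nat, p.2 = (j : Int) ∧ j < acc.length ∧
          (if p.1 = 1 then b else b ++ "#" ++ PySem.Int.toStr p.1) = specv j) →
      (ws.foldl (fun acc p => PySem.List.pySetD acc p.2
          (if p.1 = 1 then b else b ++ "#" ++ PySem.Int.toStr p.1)) acc).length = acc.length ∧
      ∀ j : Nat,
        ((∃ p ∈ ws, p.2 = (j : Int)) →
          (ws.foldl (fun acc p => PySem.List.pySetD acc p.2
            (if p.1 = 1 then b else b ++ "#" ++ PySem.Int.toStr p.1)) acc)[j]? = some (specv j)) ∧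
        ((∀ p ∈ ws, p.2 ≠ (j : Int)) →
          (ws.foldl (fun acc p => PySem.List.pySetD acc p.2
            (if p.1 = 1 then b else b ++ "#" ++ PySem.Int.toStr p.1)) acc)[j]? = acc[j]?) := by
  intro ws
  induction ws with
  | nil => intro acc _; simp
  | cons p ws ih =>
    intro acc H
    obtain ⟨j0, hp2, hj0, hval⟩ := H p (List.mem_cons_self ..)
    set v := (if p.1 = 1 then b else b ++ "#" ++ PySem.Int.toStr p.1) with hv
    have hacc' : PySem.List.pySetD acc p.2 v = acc.set j0 v := by
      rw [hp2]; simp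
    simp only [List.foldl_cons]
    rw [hacc']
    have hlen' : (acc.set j0 v).length = acc.length := by simp
    have H' : ∀ q ∈ ws, ∃ j : Nat, q.2 = (j : Int) ∧ j < (acc.set j0 v).length ∧
        (if q.1 = 1 then b else b ++ "#" ++ PySem.Int.toStr q.1) = specv j := by
      intro q hq
      obtain ⟨j, h1, h2, h3⟩ := H q (List.mem_cons_of_mem _ hq)
      exact ⟨j, h1, by omega, h3⟩
    obtain ⟨ihlen, ihel⟩ := ih (acc.set j0 v) H'
    refine ⟨by rw [ihlen]; exact hlen', ?_⟩
    intro j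
    constructor
    · rintro ⟨q, hq, hq2⟩
      rcases List.mem_cons.mp hq with rfl | hqtail
      · -- q = p : j = j0
        have hjj : j = j0 := by
          have : ((j:Int)) = (j0:Int) := by rw [← hq2, hp2]
          exact_mod_cast this
        subst hjj
        by_cases hex : ∃ q ∈ ws, q.2 = (j : Int)
        · exact (ihel j).1 hex
        · rw [(ihel j).2 (by push Not at hex; exact hex)]
          rw [List.getElem?_set_self' ]
          simp [Nat.lt_of_lt_of_eq hj0 rfl, hval]
      · exact (ihel j).1 ⟨q, hqtail, hq2⟩
    · intro hall
      rw [(ihel j).2 (fun q hq => hall q (List.mem_cons_of_mem _ hq))]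
      have hjne : j ≠ j0 := by
        intro heq
        exact hall p (List.mem_cons_self ..) (by rw [hp2, heq])
      rw [List.getElem?_set_ne (by omega)]

theorem pvScatter_spec (bases : List String) (b : String) (acc : List String)
    (hlen : acc.length = bases.length) :
    (pvScatter acc b (pvOcc bases b)).length = bases.length ∧
    ∀ j : Nat, j < bases.length →
      (bases[j]? = some b → (pvScatter acc b (pvOcc bases b))[j]? = some (pvSpecF bases j)) ∧
      (bases[j]? ≠ some b → (pvScatter acc b (pvOcc bases b))[j]? = acc[j]?) := by
  have hW : ∀ p ∈ PySem.List.enumerate (pvOcc bases b) 1, ∃ j : Nat, p.2 = (j : Int) ∧ j < acc.length ∧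
      (if p.1 = 1 then b else b ++ "#" ++ PySem.Int.toStr p.1) = pvSpecF bases j := by
    intro p hp
    rw [PySem.List.mem_enumerate_iff] at hp
    obtain ⟨k, hk, rfl⟩ := hp
    obtain ⟨j, hij, hjlt, hjb, hcnt⟩ := pvOcc_spec bases b k ((pvOcc bases b)[k])
      (List.getElem?_eq_getElem hk)
    refine ⟨j, hij, by omega, ?_⟩
    have hgetD : bases.getD j "" = b := by
      simp [List.getD, hjb]
    have h1 : (1 : Int) + (k : Int) = ((bases.take j).count b : Int) + 1 := by
      rw [hcnt]; ring
    simp only [pvSpecF, pvRender, hgetD, h1]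
  obtain ⟨hL, hE⟩ := scatter_fold b (pvSpecF bases) (PySem.List.enumerate (pvOcc bases b) 1) acc hW
  refine ⟨by rw [pvScatter, hL, hlen], ?_⟩
  intro j hj
  constructor
  · intro hjb
    have hmem : (j : Int) ∈ pvOcc bases b := pvOcc_mem bases b j hj hjb
    obtain ⟨k, hk, hkj⟩ := List.getElem_of_mem hmem
    refine (hE j).1 ⟨((1 : Int) + k, (j : Int)), ?_, rfl⟩
    rw [PySem.List.mem_enumerate_iff]
    exact ⟨k, hk, by rw [hkj]⟩
  · intro hjb
    refine (hE j).2 ?_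
    intro p hp hpj
    rw [PySem.List.mem_enumerate_iff] at hp
    obtain ⟨k, hk, rfl⟩ := hp
    obtain ⟨j', hij', hjlt', hjb', _⟩ := pvOcc_spec bases b k ((pvOcc bases b)[k])
      (List.getElem?_eq_getElem hk)
    simp only at hpj
    have : j' = j := by rw [hij'] at hpj; exact_mod_cast hpj
    exact hjb (this ▸ hjb')

theorem outer_fold (bases : List String) :
    ∀ (ds : List String) (acc : List String), acc.length = bases.length →
      (ds.foldl (fun out base => pvScatter out base (pvOcc bases base)) acc).length = bases.length ∧
      ∀ j : Nat, j < bases.length →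
        ((∃ b ∈ ds, bases[j]? = some b) →
          (ds.foldl (fun out base => pvScatter out base (pvOcc bases base)) acc)[j]? = some (pvSpecF bases j)) ∧
        ((∀ b ∈ ds, bases[j]? ≠ some b) →
          (ds.foldl (fun out base => pvScatter out base (pvOcc bases base)) acc)[j]? = acc[j]?) := by
  intro ds
  induction ds with
  | nil => intro acc h; exact ⟨h, fun j hj => ⟨fun ⟨b, hb, _⟩ => absurd hb (by simp), fun _ => rfl⟩⟩
  | cons d ds ih =>
    intro acc hlen
    obtain ⟨hL1, hE1⟩ := pvScatter_spec bases d acc hlen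
    obtain ⟨ihL, ihE⟩ := ih (pvScatter acc d (pvOcc bases d)) hL1
    simp only [List.foldl_cons]
    refine ⟨ihL, ?_⟩
    intro j hj
    constructor
    · rintro ⟨b, hb, hjb⟩
      rcases List.mem_cons.mp hb with rfl | hbtail
      · by_cases hex : ∃ b ∈ ds, bases[j]? = some b
        · exact (ihE j hj).1 hex
        · push Not at hex
          rw [(ihE j hj).2 hex]
          exact (hE1 j hj).1 hjb
      · exact (ihE j hj).1 ⟨b, hbtail, hjb⟩
    · intro hall
      rw [(ihE j hj).2 (fun b hb => hall b (List.mem_cons_of_mem _ hb))]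
      exact (hE1 j hj).2 (hall d (List.mem_cons_self ..))

-- ===== VERDICT (by name: the statement is the Claim_ definition above) =====
theorem assign_global_ids_py_spec : Claim_equal_assign_global_ids_py := by
  intro items groups _ _
  unfold Spec_assign_global_ids_py assign_global_ids_py assign_global_ids_py_alt
  rw [pvLoopA_eq_prefix groups (PySem.List.enumerate items) PySem.Dict.empty [] []
    (by intro b; simp [PySem.Dict.getD_empty])]
  rw [show ((PySem.List.enumerate items).map
      (fun p => pvBaseGlobalId p.2 ((PySem.List.pyGet? groups p.1).getD none) p.1)) =
      pvBases items groups from rfl]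
  simp only [List.nil_append]
  obtain ⟨hBlen, hBel⟩ := outer_fold (pvBases items groups)
    (PySem.List.dedup (pvBases items groups))
    (List.replicate (pvBases items groups).length "") (by simp)
  apply List.ext_getElem?
  intro j
  by_cases hj : j < (pvBases items groups).length
  · rw [getElem?_pvPrefix _ [] j hj]
    rw [(hBel j hj).1 ⟨(pvBases items groups)[j],
      (PySem.List.mem_dedup _ _).mpr (List.getElem_mem hj), List.getElem?_eq_getElem hj⟩]
    simp [pvSpecF]
  · rw [List.getElem?_eq_none (by rw [length_pvPrefix]; omega),
      List.getElem?_eq_none (by omega)]
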